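-- pv_equiv track=rewrite | github.com/trigoldsun/AI_NueroCodingAgent | scripts/tracing.py | parse_traceparent
-- ===== SOURCE A (Python) =====
-- from typing import Optional, Callable, Any, Generator
--
-- def parse_traceparent(traceparent: str) -> tuple[Optional[str], Optional[str], Optional[str]]:
--     """
--     Parse a W3C traceparent header value into its components.
--
--     Args:
--         traceparent: Full traceparent string (e.g., "00-0af7651916cd43dd8448eb211c80319c-b7ad6b7169203331-01")
--
--     Returns:
--         Tuple of (version, trace_id, span_id). Returns (None, None, None) if invalid.
--
--     Example:
--         version, trace_id, span_id = parse_traceparent(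
--             "00-0af7651916cd43dd8448eb211c80319c-b7ad6b7169203331-01"
--         )
--         # trace_id = "0af7651916cd43dd8448eb211c80319c"
--         # span_id = "b7ad6b7169203331"
--     """
--     if not traceparent:
--         return None, None, None
--
--     parts = traceparent.split("-")
--     if len(parts) != 4:
--         return None, None, None
--
--     version, trace_id, span_id, flags = parts
--
--     # Validate lengths per W3C Trace Context spec
--     if len(version) != 2 or len(trace_id) != 32 or len(span_id) != 16 or len(flags) != 2:
--         return None, None, None
--
--     # Validate hex characters
--     hex_chars = set("0123456789abcdef")
--     if not all(c in hex_chars for c in trace_id + span_id):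
--         return None, None, None
--
--     return version, trace_id, span_id
-- ===== SOURCE B (Python) =====
-- def parse_traceparent(traceparent: str):
--     # Positional validation: a valid traceparent is exactly 55 chars with dashes
--     # at fixed offsets 2, 35, 52 (and nowhere else), hex in the two id fields.
--     HEX = "0123456789abcdef"
--     s = traceparent
--     if (len(s) == 55 and s[2] == "-" and s[35] == "-" and s[52] == "-"
--             and "-" not in s[:2] and "-" not in s[53:]
--             and all(c in HEX for c in s[3:35])
--             and all(c in HEX for c in s[36:52])):
--         return s[:2], s[3:35], s[36:52]
--     return None, None, None
-- ===== Notes on version B (the rewrite author's own statement) =====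
-- stated objective: alternative
-- what changed: B drops the split-on-dash-and-check-four-parts pipeline and instead validates the header positionally: length exactly 55, dashes at fixed offsets 2/35/52 and nowhere in the version/flags fields, hex characters in the two fixed id slices, returning those slices directly.
import Mathlib
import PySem

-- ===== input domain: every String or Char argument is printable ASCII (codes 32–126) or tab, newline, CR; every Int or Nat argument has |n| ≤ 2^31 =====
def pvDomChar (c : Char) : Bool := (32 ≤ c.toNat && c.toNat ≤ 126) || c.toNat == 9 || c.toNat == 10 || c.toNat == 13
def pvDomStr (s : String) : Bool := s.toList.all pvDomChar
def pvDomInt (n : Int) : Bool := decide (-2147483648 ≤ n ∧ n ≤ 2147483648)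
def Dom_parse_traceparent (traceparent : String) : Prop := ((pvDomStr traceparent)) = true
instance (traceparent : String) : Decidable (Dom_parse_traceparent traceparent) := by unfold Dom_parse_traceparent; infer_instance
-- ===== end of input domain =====

-- B validates the header positionally (fixed length 55, dashes at offsets 2/35/52, hex slices)
-- instead of splitting on "-" and checking the four parts; objective: alternative structure, same cost.

-- ===== PORT A =====
def parse_traceparent (traceparent : String) : Option String × Option String × Option String :=
  if traceparent.toList.isEmpty then (none, none, none)
  else
    match PySem.Str.split? traceparent "-" with
    | some [version, trace_id, span_id, flags] =>
      if ¬ (PySem.Str.len version = 2) ∨ ¬ (PySem.Str.len trace_id = 32) ∨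
         ¬ (PySem.Str.len span_id = 16) ∨ ¬ (PySem.Str.len flags = 2) then (none, none, none)
      else
        let hex_chars := PySem.Set.ofList ("0123456789abcdef".toList)
        if ¬ ((trace_id.toList ++ span_id.toList).all (fun c => hex_chars.contains c) = true) then
          (none, none, none)
        else
          (some version, some trace_id, some span_id)
    | _ => (none, none, none)   -- len(parts) != 4

-- ===== PORT B =====
def pvHex : List Char := "0123456789abcdef".toList

def parse_traceparent_alt (traceparent : String) : Option String × Option String × Option String :=
  let l := traceparent.toList
  if (l.length == 55
      && PySem.List.pyGet? l 2 == some '-'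
      && PySem.List.pyGet? l 35 == some '-'
      && PySem.List.pyGet? l 52 == some '-'
      && !(PySem.Chars.isIn ['-'] (PySem.List.slice l none (some 2)))
      && !(PySem.Chars.isIn ['-'] (PySem.List.slice l (some 53) none))
      && (PySem.List.slice l (some 3) (some 35)).all (fun c => PySem.Chars.isIn [c] pvHex)
      && (PySem.List.slice l (some 36) (some 52)).all (fun c => PySem.Chars.isIn [c] pvHex))
  then (some (String.ofList (PySem.List.slice l none (some 2))),
        some (String.ofList (PySem.List.slice l (some 3) (some 35))),
        some (String.ofList (PySem.List.slice l (some 36) (some 52))))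
  else (none, none, none)

-- ===== PRECONDITION & SPEC =====
def Spec_parse_traceparent (traceparent : String) (out : Option String × Option String × Option String) : Prop := out = parse_traceparent_alt traceparent
instance (traceparent : String) (out : Option String × Option String × Option String) : Decidable (Spec_parse_traceparent traceparent out) := by unfold Spec_parse_traceparent; infer_instance

-- ===== CLAIM (what is proved, stated in full; the proofs are below) =====
def Claim_equal_parse_traceparent : Prop := ∀ (traceparent : String), Dom_parse_traceparent traceparent → Spec_parse_traceparent traceparent (parse_traceparent traceparent)

-- ===== LEMMAS AND PROOFS =====

/-- Prepend a chunk onto the head of a (never-empty) split result. -/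
def consH (p : List Char) : List (List Char) → List (List Char)
  | [] => [p]
  | h :: r => (p ++ h) :: r

/-- Reference recursion for splitting a char list on '-'. -/
def splitD : List Char → List (List Char)
  | [] => [[]]
  | a :: t => if a = '-' then [] :: splitD t else consH [a] (splitD t)

theorem consH_ne_nil (p : List Char) (ls : List (List Char)) : consH p ls ≠ [] := by
  cases ls <;> simp [consH]

theorem splitD_ne_nil (l : List Char) : splitD l ≠ [] := by
  cases l with
  | nil => simp [splitD]
  | cons a t => by_cases h : a = '-' <;> simp [splitD, h, consH_ne_nil]

theorem consH_consH (p q : List Char) (ls : List (List Char)) :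
    consH p (consH q ls) = consH (p ++ q) ls := by
  cases ls <;> simp [consH]

theorem consH_nil_of_ne (ls : List (List Char)) (h : ls ≠ []) : consH [] ls = ls := by
  cases ls with
  | nil => exact absurd rfl h
  | cons a t => simp [consH]

theorem go_spec (fuel : Nat) : ∀ (l cur : List Char) (acc : List (List Char)),
    l.length ≤ fuel →
    PySem.Chars.splitOn.go ['-'] fuel l cur acc = acc.reverse ++ consH cur.reverse (splitD l) := by
  induction fuel with
  | zero =>
    intro l cur acc h
    have hl : l = [] := by cases l <;> simp_all
    subst hl
    rw [PySem.Chars.splitOn.go.eq_def]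
    simp [splitD, consH]
  | succ fuel ih =>
    intro l cur acc h
    cases l with
    | nil =>
      rw [PySem.Chars.splitOn.go.eq_def]
      simp [splitD, consH]
    | cons a rest =>
      rw [PySem.Chars.splitOn.go.eq_def]
      simp only [List.length_cons] at h
      by_cases ha : a = '-'
      · subst ha
        have hpre : List.isPrefixOf ['-'] ('-' :: rest) = true := by simp [List.isPrefixOf]
        simp only [hpre, if_pos, List.length_cons, List.length_nil, List.drop_succ_cons,
          List.drop_zero]
        rw [ih rest [] (cur.reverse :: acc) (by omega)]
        rw [List.reverse_nil, consH_nil_of_ne _ (splitD_ne_nil rest)]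
        simp [splitD, consH]
      · have hpre : List.isPrefixOf ['-'] (a :: rest) = false := by
          simp [List.isPrefixOf]
          exact fun hc => absurd hc.symm ha
        simp only [hpre, Bool.false_eq_true, if_false]
        rw [ih rest (a :: cur) acc (by omega)]
        simp [splitD, if_neg ha, consH_consH]

theorem splitOn_dash (l : List Char) : PySem.Chars.splitOn l ['-'] = splitD l := by
  unfold PySem.Chars.splitOn
  rw [go_spec (l.length + 1) l [] [] (by omega)]
  simp [consH_nil_of_ne _ (splitD_ne_nil l)]

theorem splitD_no_dash (l : List Char) : ∀ p ∈ splitD l, '-' ∉ p := by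
  induction l with
  | nil => simp [splitD]
  | cons a t ih =>
    intro p hp
    by_cases ha : a = '-'
    · subst ha
      rw [splitD, if_pos rfl] at hp
      rcases List.mem_cons.mp hp with hp | hp
      · simp [hp]
      · exact ih p hp
    · simp only [splitD, if_neg ha] at hp
      rcases hsp : splitD t with _ | ⟨h, r⟩
      · exact absurd hsp (splitD_ne_nil t)
      · rw [hsp] at hp
        simp only [consH, List.singleton_append] at hp
        rcases List.mem_cons.mp hp with hp | hp
        · subst hp
          intro hm
          rcases List.mem_cons.mp hm with hm | hm
          · exact ha hm.symm
          · exact ih h (by rw [hsp]; exact List.mem_cons_self ..) hm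
        · exact ih p (by rw [hsp]; exact List.mem_cons_of_mem _ hp)

theorem splitD_eq_cons (l : List Char) : ∀ (V : List Char) (rest : List (List Char)),
    splitD l = V :: rest →
    (rest = [] ∧ l = V) ∨ (∃ l', l = V ++ '-' :: l' ∧ splitD l' = rest) := by
  induction l with
  | nil =>
    intro V rest h
    rw [splitD] at h
    have hh : V = [] ∧ rest = [] := by simpa using h.symm
    exact Or.inl ⟨hh.2, hh.1.symm⟩
  | cons a t ih =>
    intro V rest h
    by_cases ha : a = '-'
    · subst ha
      rw [splitD, if_pos rfl] at h
      obtain ⟨hV, hr⟩ := List.cons_eq_cons.mp h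
      exact Or.inr ⟨t, by rw [← hV]; simp, hr⟩
    · rw [splitD, if_neg ha] at h
      rcases hsp : splitD t with _ | ⟨h0, r⟩
      · exact absurd hsp (splitD_ne_nil t)
      · rw [hsp] at h
        simp only [consH, List.singleton_append] at h
        obtain ⟨hV, hr⟩ := List.cons_eq_cons.mp h
        rcases ih h0 r hsp with ⟨hre, hte⟩ | ⟨l', hl', hsp'⟩
        · exact Or.inl ⟨by rw [← hr, hre], by rw [← hV, hte]⟩
        · exact Or.inr ⟨l', by rw [← hV, hl']; rfl, by rw [hsp', hr]⟩

theorem splitD_append (V l' : List Char) (h : '-' ∉ V) :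
    splitD (V ++ '-' :: l') = V :: splitD l' := by
  induction V with
  | nil => simp [splitD]
  | cons a W ih =>
    have ha : a ≠ '-' := fun hc => h (by simp [hc])
    have hW : '-' ∉ W := fun hc => h (List.mem_cons_of_mem _ hc)
    simp only [List.cons_append, splitD, if_neg ha, ih hW, consH]
    simp

theorem splitD_pure (F : List Char) (h : '-' ∉ F) : splitD F = [F] := by
  induction F with
  | nil => simp [splitD]
  | cons a W ih =>
    have ha : a ≠ '-' := fun hc => h (by simp [hc])
    have hW : '-' ∉ W := fun hc => h (List.mem_cons_of_mem _ hc)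
    simp [splitD, if_neg ha, ih hW, consH]

theorem isIn_singleton (c : Char) (s : List Char) : PySem.Chars.isIn [c] s = true ↔ c ∈ s := by
  rw [PySem.Chars.isIn_iff_infix]
  constructor
  · intro h
    exact List.singleton_sublist.mp h.sublist
  · intro h
    obtain ⟨p, q, rfl⟩ := List.append_of_mem h
    exact ⟨p, q, by simp⟩

theorem hex_pred_eq :
    (fun c => (PySem.Set.ofList ("0123456789abcdef".toList)).contains c)
      = (fun c => PySem.Chars.isIn [c] pvHex) := by
  funext c
  rw [Bool.eq_iff_iff, PySem.Set.contains_iff, PySem.Set.mem_ofList, isIn_singleton]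
  rfl

theorem not_dash_of_hex (T : List Char)
    (h : T.all (fun c => PySem.Chars.isIn [c] pvHex) = true) : '-' ∉ T := by
  intro hm
  have := List.all_eq_true.mp h _ hm
  rw [isIn_singleton] at this
  exact absurd this (by decide)

theorem isIn_dash_false (V : List Char) (h : '-' ∉ V) : PySem.Chars.isIn ['-'] V = false := by
  cases hb : PySem.Chars.isIn ['-'] V
  · rfl
  · exact absurd ((isIn_singleton _ _).mp hb) h

theorem all_hex_eq (L : List Char) :
    (L.all (fun c => (PySem.Set.ofList ("0123456789abcdef".toList)).contains c))
      = L.all (fun c => PySem.Chars.isIn [c] pvHex) := by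
  rw [hex_pred_eq]

theorem splitD_four (l V T S F : List Char) (h : splitD l = [V, T, S, F]) :
    l = V ++ '-' :: (T ++ '-' :: (S ++ '-' :: F)) := by
  rcases splitD_eq_cons l V [T, S, F] h with ⟨h1, _⟩ | ⟨l1, hl1, h1⟩
  · simp at h1
  rcases splitD_eq_cons l1 T [S, F] h1 with ⟨h2, _⟩ | ⟨l2, hl2, h2⟩
  · simp at h2
  rcases splitD_eq_cons l2 S [F] h2 with ⟨h3, _⟩ | ⟨l3, hl3, h3⟩
  · simp at h3
  rcases splitD_eq_cons l3 F [] h3 with ⟨_, h4⟩ | ⟨l4, _, h4⟩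
  · rw [hl1, hl2, hl3, h4]
  · exact absurd h4 (splitD_ne_nil l4)

theorem split?_eq (t : String) :
    PySem.Str.split? t "-" = some ((splitD t.toList).map String.ofList) := by
  unfold PySem.Str.split? PySem.Chars.split?
  rw [show ("-" : String).toList = ['-'] from by decide]
  simp [splitOn_dash]

-- ===== VERDICT (by name: the statement is the Claim_ definition above) =====
theorem parse_traceparent_spec : Claim_equal_parse_traceparent := by
  intro t _
  unfold Spec_parse_traceparent
  by_cases hval : ∃ V T S F : List Char, splitD t.toList = [V, T, S, F] ∧
      V.length = 2 ∧ T.length = 32 ∧ S.length = 16 ∧ F.length = 2 ∧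
      ((T ++ S).all (fun c => PySem.Chars.isIn [c] pvHex) = true)
  · obtain ⟨V, T, S, F, hps, hV, hT, hS, hF, hhex⟩ := hval
    have hdec := splitD_four _ _ _ _ _ hps
    have hnV : '-' ∉ V := splitD_no_dash _ V (by rw [hps]; simp)
    have hnT : '-' ∉ T := splitD_no_dash _ T (by rw [hps]; simp)
    have hnS : '-' ∉ S := splitD_no_dash _ S (by rw [hps]; simp)
    have hnF : '-' ∉ F := splitD_no_dash _ F (by rw [hps]; simp)
    have h3 : t.toList = (V ++ ['-']) ++ (T ++ '-' :: (S ++ '-' :: F)) := by rw [hdec]; simp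
    have h35 : t.toList = (V ++ '-' :: T) ++ '-' :: (S ++ '-' :: F) := by rw [hdec]; simp
    have h36 : t.toList = (V ++ '-' :: T ++ ['-']) ++ (S ++ '-' :: F) := by rw [hdec]; simp
    have h52 : t.toList = (V ++ '-' :: T ++ '-' :: S) ++ '-' :: F := by rw [hdec]; simp
    have h53 : t.toList = (V ++ '-' :: T ++ '-' :: S ++ ['-']) ++ F := by rw [hdec]; simp
    have hc1 : t.toList.length = 55 := by
      rw [hdec]; simp [hV, hT, hS, hF]
    have hg2 : PySem.List.pyGet? t.toList 2 = some '-' := by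
      have := PySem.List.pyGet?_append_length V ((T ++ '-' :: (S ++ '-' :: F))) '-'
      rw [hV] at this; rw [hdec]; exact_mod_cast this
    have hg35 : PySem.List.pyGet? t.toList 35 = some '-' := by
      have := PySem.List.pyGet?_append_length (V ++ '-' :: T) ((S ++ '-' :: F)) '-'
      rw [show (V ++ '-' :: T).length = 35 from by simp [hV, hT]] at this
      rw [h35]; exact_mod_cast this
    have hg52 : PySem.List.pyGet? t.toList 52 = some '-' := by
      have := PySem.List.pyGet?_append_length (V ++ '-' :: T ++ '-' :: S) F '-'
      rw [show (V ++ '-' :: T ++ '-' :: S).length = 52 from by simp [hV, hT, hS]] at this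
      rw [h52]; exact_mod_cast this
    have hs0 : PySem.List.slice t.toList none (some 2) = V := by
      rw [PySem.List.slice_to _ (by norm_num), hdec]
      exact List.take_left' (by rw [hV]; rfl)
    have hs1 : PySem.List.slice t.toList (some 3) (some 35) = T := by
      rw [PySem.List.slice_toNat _ (by norm_num) (by norm_num), h3,
        List.drop_left' (by simp [hV])]
      exact List.take_left' (by rw [hT]; rfl)
    have hs2 : PySem.List.slice t.toList (some 36) (some 52) = S := by
      rw [PySem.List.slice_toNat _ (by norm_num) (by norm_num), h36,
        List.drop_left' (by simp [hV, hT])]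
      exact List.take_left' (by rw [hS]; rfl)
    have hs3 : PySem.List.slice t.toList (some 53) none = F := by
      rw [PySem.List.slice_from _ (by norm_num), h53,
        List.drop_left' (by simp [hV, hT, hS])]
    have hemp : t.toList.isEmpty = false := by
      rw [List.isEmpty_eq_false_iff, ← List.length_pos_iff, hc1]; omega
    have hha : (T.all (fun c => PySem.Chars.isIn [c] pvHex)
        && S.all (fun c => PySem.Chars.isIn [c] pvHex)) = true := by
      rw [← List.all_append]; exact hhex
    have hhexT : T.all (fun c => PySem.Chars.isIn [c] pvHex) = true :=
      (Bool.and_eq_true_iff.mp hha).1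
    have hhexS : S.all (fun c => PySem.Chars.isIn [c] pvHex) = true :=
      (Bool.and_eq_true_iff.mp hha).2
    -- reduce port A
    rw [parse_traceparent, if_neg (by simp [hemp]), split?_eq, hps]
    simp only [List.map]
    rw [if_neg (by
      simp only [PySem.Str.len, String.toList_ofList, hV, hT, hS, hF]
      norm_num)]
    rw [if_neg (by
      simp only [String.toList_ofList, all_hex_eq, not_not]
      exact hhex)]
    -- reduce port B
    rw [parse_traceparent_alt]
    simp only [hs0, hs1, hs2, hs3, hg2, hg35, hg52, hc1]
    rw [if_pos (by
      simp [isIn_dash_false V hnV, isIn_dash_false F hnF, hhexT, hhexS])]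
  · -- invalid input: both sides return (none, none, none)
    have hB : parse_traceparent_alt t = (none, none, none) := by
      rw [parse_traceparent_alt]
      by_cases hb : (t.toList.length == 55
          && PySem.List.pyGet? t.toList 2 == some '-'
          && PySem.List.pyGet? t.toList 35 == some '-'
          && PySem.List.pyGet? t.toList 52 == some '-'
          && !(PySem.Chars.isIn ['-'] (PySem.List.slice t.toList none (some 2)))
          && !(PySem.Chars.isIn ['-'] (PySem.List.slice t.toList (some 53) none))
          && (PySem.List.slice t.toList (some 3) (some 35)).all
              (fun c => PySem.Chars.isIn [c] pvHex)
          && (PySem.List.slice t.toList (some 36) (some 52)).all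
              (fun c => PySem.Chars.isIn [c] pvHex)) = true
      · exfalso
        simp only [Bool.and_eq_true, beq_iff_eq, Bool.not_eq_true'] at hb
        obtain ⟨⟨⟨⟨⟨⟨⟨h55, hg2⟩, hg35⟩, hg52⟩, hnV'⟩, hnF'⟩, ha1⟩, ha2⟩ := hb
        set l := t.toList with hl
        have hget : ∀ (i : ℕ) (hi : i < l.length),
            PySem.List.pyGet? l (i : ℤ) = some '-' → l[i] = '-' := by
          intro i hi hg
          have := PySem.List.pyGet?_ofNat (xs := l) (n := i) hi
          rw [hg] at this
          exact (Option.some_inj.mp this).symm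
        have hi2 : l[2]'(by omega) = '-' := hget 2 (by omega) (by exact_mod_cast hg2)
        have hi35 : l[35]'(by omega) = '-' := hget 35 (by omega) (by exact_mod_cast hg35)
        have hi52 : l[52]'(by omega) = '-' := hget 52 (by omega) (by exact_mod_cast hg52)
        set V := l.take 2 with hVdef
        set T := (l.drop 3).take 32 with hTdef
        set S := (l.drop 36).take 16 with hSdef
        set F := l.drop 53 with hFdef
        have e2 : l.drop 2 = '-' :: l.drop 3 := by
          rw [List.drop_eq_getElem_cons (by omega), hi2]
        have e3 : l.drop 3 = T ++ l.drop 35 := by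
          conv_lhs => rw [← List.take_append_drop 32 (l.drop 3)]
          rw [List.drop_drop]
        have e4 : l.drop 35 = '-' :: l.drop 36 := by
          rw [List.drop_eq_getElem_cons (by omega), hi35]
        have e5 : l.drop 36 = S ++ l.drop 52 := by
          conv_lhs => rw [← List.take_append_drop 16 (l.drop 36)]
          rw [List.drop_drop]
        have e6 : l.drop 52 = '-' :: F := by
          rw [List.drop_eq_getElem_cons (by omega), hi52, hFdef]
        have hdec : l = V ++ '-' :: (T ++ '-' :: (S ++ '-' :: F)) := by
          conv_lhs => rw [← List.take_append_drop 2 l]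
          rw [e2, e3, e4, e5, e6]
        have hVl : V.length = 2 := by rw [hVdef]; simp [h55]
        have hTl : T.length = 32 := by rw [hTdef]; simp [h55]
        have hSl : S.length = 16 := by rw [hSdef]; simp [h55]
        have hFl : F.length = 2 := by rw [hFdef]; simp [h55]
        have hsV : PySem.List.slice l none (some 2) = V := by
          rw [PySem.List.slice_to _ (by norm_num)]; rfl
        have hsT : PySem.List.slice l (some 3) (some 35) = T := by
          rw [PySem.List.slice_toNat _ (by norm_num) (by norm_num)]; rfl
        have hsS : PySem.List.slice l (some 36) (some 52) = S := by
          rw [PySem.List.slice_toNat _ (by norm_num) (by norm_num)]; rfl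
        have hsF : PySem.List.slice l (some 53) none = F := by
          rw [PySem.List.slice_from _ (by norm_num)]; rfl
        rw [hsT] at ha1
        rw [hsS] at ha2
        rw [hsV] at hnV'
        rw [hsF] at hnF'
        have hnV : '-' ∉ V := fun hm => by
          have := (isIn_singleton '-' V).mpr hm; rw [hnV'] at this; exact Bool.false_ne_true this
        have hnF : '-' ∉ F := fun hm => by
          have := (isIn_singleton '-' F).mpr hm; rw [hnF'] at this; exact Bool.false_ne_true this
        have hnT : '-' ∉ T := not_dash_of_hex T ha1
        have hnS : '-' ∉ S := not_dash_of_hex S ha2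
        have hsplitD : splitD l = [V, T, S, F] := by
          rw [hdec, splitD_append _ _ hnV, splitD_append _ _ hnT, splitD_append _ _ hnS,
            splitD_pure _ hnF]
        exact hval ⟨V, T, S, F, hsplitD, hVl, hTl, hSl, hFl, by
          rw [List.all_append, ha1, ha2]; rfl⟩
      · rw [Bool.not_eq_true] at hb
        rw [if_neg (by rw [hb]; simp)]
    rw [hB, parse_traceparent]
    by_cases hemp : t.toList.isEmpty
    · rw [if_pos (by simp [hemp])]
    · rw [if_neg (by simpa using hemp), split?_eq]
      rcases hq : splitD t.toList with _ | ⟨V, rest⟩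
      · exact absurd hq (splitD_ne_nil _)
      rcases rest with _ | ⟨T, rest⟩
      · simp
      rcases rest with _ | ⟨S, rest⟩
      · simp
      rcases rest with _ | ⟨F, rest⟩
      · simp
      rcases rest with _ | ⟨G, rest⟩
      swap
      · simp
      simp only [List.map]
      by_cases hlen : V.length = 2 ∧ T.length = 32 ∧ S.length = 16 ∧ F.length = 2
      · rw [if_neg (by
          simp only [PySem.Str.len, String.toList_ofList, hlen.1, hlen.2.1, hlen.2.2.1,
            hlen.2.2.2]
          norm_num)]
        by_cases hhex : ((T ++ S).all (fun c => PySem.Chars.isIn [c] pvHex) = true)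
        · exact absurd ⟨V, T, S, F, hq, hlen.1, hlen.2.1, hlen.2.2.1, hlen.2.2.2, hhex⟩ hval
        · rw [if_pos (by
            simp only [String.toList_ofList, all_hex_eq]
            exact hhex)]
      · rw [if_pos (by
          simp only [PySem.Str.len, String.toList_ofList]
          have hni : ¬((V.length : ℤ) = 2 ∧ (T.length : ℤ) = 32 ∧ (S.length : ℤ) = 16 ∧
              (F.length : ℤ) = 2) := fun hc => hlen (by exact_mod_cast hc)
          tauto)]
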